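-- pv_equiv track=rewrite | github.com/fedefreak92/dungeon-master-ai-project | states/dialogo.py | _trova_opzione_da_testo
-- ===== SOURCE A (Python) =====
-- def _trova_opzione_da_testo(testo_input, opzioni):
--     """
--     Cerca di abbinare l'input testuale a un'opzione di dialogo
--
--     Args:
--         testo_input (str): Il testo inserito dall'utente
--         opzioni (list): Lista di opzioni di dialogo
--
--     Returns:
--         int or None: L'indice dell'opzione corrispondente + 1, o None se non trovata
--     """
--     testo_input = testo_input.lower().strip()
--
--     # Cerca una corrispondenza esatta o parziale con un'opzione
--     for i, (testo_opzione, _) in enumerate(opzioni, 1):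
--         if testo_input == testo_opzione.lower() or testo_input in testo_opzione.lower():
--             return i
--
--     # Se non trova una corrispondenza diretta, cerca parole chiave
--     for i, (testo_opzione, _) in enumerate(opzioni, 1):
--         # Dividi il testo dell'opzione in parole
--         parole = set(testo_opzione.lower().split())
--         # Se almeno una parola dell'input utente è anche nel testo dell'opzione
--         if any(parola in parole for parola in testo_input.split()):
--             return i
--
--     return None
-- ===== SOURCE B (Python) =====
-- def _trova_opzione_da_testo(testo_input, opzioni):
--     """Single pass: return immediately on a substring match; merely record the
--     first word-overlap match and fall back to it after the loop."""
--     testo = testo_input.lower().strip()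
--     parole_input = testo.split()
--     primo_match_parola = None
--     for i, (testo_opzione, _) in enumerate(opzioni, 1):
--         opzione = testo_opzione.lower()
--         if testo in opzione:
--             return i
--         if primo_match_parola is None:
--             parole = set(opzione.split())
--             if any(p in parole for p in parole_input):
--                 primo_match_parola = i
--     return primo_match_parola
-- ===== Notes on version B (the rewrite author's own statement) =====
-- stated objective: faster
-- what changed: Replaced A's two sequential scans over the options (substring pass, then word-overlap pass) by a single accumulator-carrying pass that returns on the first substring match and records only the first word-overlap match; each option is lowercased once and the no-match case does one scan instead of two.
import Mathlib
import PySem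

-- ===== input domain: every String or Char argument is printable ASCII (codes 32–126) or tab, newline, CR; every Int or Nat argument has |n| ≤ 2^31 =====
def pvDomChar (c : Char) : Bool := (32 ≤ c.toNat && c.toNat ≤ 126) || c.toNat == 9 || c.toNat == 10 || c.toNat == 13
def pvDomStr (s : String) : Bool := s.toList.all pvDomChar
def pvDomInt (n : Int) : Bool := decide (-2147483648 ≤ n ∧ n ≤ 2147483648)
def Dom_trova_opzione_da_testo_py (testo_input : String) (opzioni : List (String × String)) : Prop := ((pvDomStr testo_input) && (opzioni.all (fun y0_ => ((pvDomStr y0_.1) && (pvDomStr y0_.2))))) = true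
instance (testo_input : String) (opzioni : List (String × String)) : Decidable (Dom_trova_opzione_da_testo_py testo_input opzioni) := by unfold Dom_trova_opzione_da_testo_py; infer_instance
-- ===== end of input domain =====

-- B collapses A's two sequential scans into one pass that returns on the first substring match
-- and records the first word-overlap match as a fallback (objective: alternative decomposition).


-- ===== PORT A =====
-- first loop of A: substring (or equality) match, enumerate(opzioni, 1)
def pvA_loop1 (t : String) : List (String × String) → Int → Option Int
  | [], _ => none
  | (opt, _) :: rest, i =>
    if t == PySem.Str.lower opt || PySem.Str.isIn t (PySem.Str.lower opt) then some i
    else pvA_loop1 t rest (i + 1)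

-- second loop of A: word-overlap match, enumerate(opzioni, 1)
def pvA_loop2 (parole_input : List String) : List (String × String) → Int → Option Int
  | [], _ => none
  | (opt, _) :: rest, i =>
    let parole := PySem.Set.ofList (PySem.Str.split₀ (PySem.Str.lower opt))
    if parole_input.any (fun p => PySem.Set.contains parole p) then some i
    else pvA_loop2 parole_input rest (i + 1)

def trova_opzione_da_testo_py (testo_input : String) (opzioni : List (String × String)) : Option Int :=
  let t := PySem.Str.strip (PySem.Str.lower testo_input)
  match pvA_loop1 t opzioni 1 with
  | some i => some i
  | none => pvA_loop2 (PySem.Str.split₀ t) opzioni 1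

-- ===== PORT B =====
-- B's single loop: return on substring hit, record first word-overlap in the accumulator
def pvB_loop (t : String) (parole_input : List String) :
    List (String × String) → Int → Option Int → Option Int
  | [], _, primo => primo
  | (opt, _) :: rest, i, primo =>
    let opz := PySem.Str.lower opt
    if PySem.Str.isIn t opz then some i
    else
      let primo' :=
        match primo with
        | some j => some j
        | none =>
          let parole := PySem.Set.ofList (PySem.Str.split₀ opz)
          if parole_input.any (fun p => PySem.Set.contains parole p) then some i else none
      pvB_loop t parole_input rest (i + 1) primo'

def trova_opzione_da_testo_py_alt (testo_input : String) (opzioni : List (String × String)) : Option Int :=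
  let t := PySem.Str.strip (PySem.Str.lower testo_input)
  pvB_loop t (PySem.Str.split₀ t) opzioni 1 none

-- ===== PRECONDITION & SPEC =====
def Spec_trova_opzione_da_testo_py (testo_input : String) (opzioni : List (String × String)) (out : Option Int) : Prop := out = trova_opzione_da_testo_py_alt testo_input opzioni
instance (testo_input : String) (opzioni : List (String × String)) (out : Option Int) : Decidable (Spec_trova_opzione_da_testo_py testo_input opzioni out) := by unfold Spec_trova_opzione_da_testo_py; infer_instance

-- ===== CLAIM (what is proved, stated in full; the proofs are below) =====
def Claim_equal_trova_opzione_da_testo_py : Prop := ∀ (testo_input : String) (opzioni : List (String × String)), Dom_trova_opzione_da_testo_py testo_input opzioni → Spec_trova_opzione_da_testo_py testo_input opzioni (trova_opzione_da_testo_py testo_input opzioni)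

-- ===== LEMMAS AND PROOFS =====

-- equality is subsumed by the substring test: A's disjunct collapses to B's single test
theorem pv_eq_or_isIn (t s : String) :
    (t == s || PySem.Str.isIn t s) = PySem.Str.isIn t s := by
  by_cases h : t = s
  · subst h
    simp
    exact (PySem.Chars.isIn_iff_infix t.toList t.toList).mpr List.infix_rfl
  · simp [h]

-- loop invariant: B's single pass equals A's first scan, then the accumulator, then A's second scan
theorem pvB_loop_eq (t : String) (w : List String) (l : List (String × String)) (i : Int)
    (primo : Option Int) :
    pvB_loop t w l i primo =
      match pvA_loop1 t l i with
      | some j => some j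
      | none =>
        match primo with
        | some k => some k
        | none => pvA_loop2 w l i := by
  induction l generalizing i primo with
  | nil => cases primo <;> simp [pvB_loop, pvA_loop1, pvA_loop2]
  | cons hd rest ih =>
    obtain ⟨opt, v⟩ := hd
    simp only [pvB_loop, pvA_loop1, pvA_loop2, pv_eq_or_isIn]
    by_cases hc : PySem.Str.isIn t (PySem.Str.lower opt) = true
    · rw [if_pos hc, if_pos hc]
    · rw [if_neg hc, if_neg hc, ih]
      cases primo with
      | some k => rfl
      | none =>
        by_cases hw : (w.any fun p =>
            PySem.Set.contains (PySem.Set.ofList (PySem.Str.split₀ (PySem.Str.lower opt))) p) = true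
        · rw [if_pos hw, if_pos hw]
        · rw [if_neg hw, if_neg hw]

-- ===== VERDICT (by name: the statement is the Claim_ definition above) =====
theorem trova_opzione_da_testo_py_spec : Claim_equal_trova_opzione_da_testo_py := by
  intro testo_input opzioni _
  unfold Spec_trova_opzione_da_testo_py trova_opzione_da_testo_py trova_opzione_da_testo_py_alt
  rw [pvB_loop_eq]
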